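-- pv_equiv track=rewrite | github.com/Hack-the-Hill-2023/Hack_the_Hill_Project | kaan/Triangle Rewards.py | create_dictionary_transformed_dataset
-- ===== SOURCE A (Python) =====
-- def combine_categories_with_indices():
--     themes = ["Tires & Wheels", "Batteries, Maintenance & Accessories", "Auto Parts",
--               "Oils, Fluids, Additives & Chemicals", "ATVs, Snowmobiles, Motorcycles Parts & Accessories",
--               "Auto Body Repair, Paints & Accessories", "Exterior Accessories", "Interior Accessories", "Auto Tools",
--               "Car Cleaning",
--
--               "Garage Organization & Tool Storage", "Power Tools", "Hand Tools", "Air Tools & Compressors",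
--               "Paints & Stains", "Ladders & Scaffolding", "Sinks, Faucets & Fixtures",
--               "Plumbing", "Power Tool Accessories", "Electrical",
--
--               "Appliances", "Kitchen & Dining", "Household & Cleaning Supplies", "Pet Care", "Furniture & Décor",
--               "Heating, Cooling & Air Quality", "Storage & Organization",
--               "Home Electronics", "Lighting", "Baby & Toddler",
--
--               "Games Room", "Team Sports", "Winter Sports", "Clothing, Shoes & Accessories", "Fitness & Exercise",
--               "Bikes & Accessories", "Toys & Games", "Hunting", "Fishing", "Camping & Hiking",
--
--               "Patio Furniture & Décor", "BBQs, Smokers & Accessories", "Outdoor Power Equipment",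
--               "Gazebos, Pergolas & Canopies", "Pools, Spas & Accessories", "Outdoor Lighting",
--               "Lawn & Garden", "Outdoor Heating", "Mosquito, Insect & Pest Control", "Sheds & Outdoor Storage",
--
--               "Balloons & Accessories", "Party Decorations", "Tableware & Serveware", "Party Favours", "Party Games",
--               "Halloween", "Wrapping Paper, Bags & Acc",
--               "Cards & Invitations", "Party Cleanup",
--
--               "Snow Removal Equipment", "Winter Sports", "Snowmobile", "Heating, Cooling, & Air Quality",
--               "Winter Tires", "Snow Plows & Accessories", "Winter Apparel"]
--     nums = []
--     for int in range(66):
--         nums.append(int)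
--
--     res = {}
--     for key in themes:
--         for value in nums:
--             res[key] = value
--             nums.remove(value)
--             break
--     return res
--
-- def create_dictionary_transformed_dataset(dataset):
--     categories = combine_categories_with_indices()
--     dataset2 = []
--     for lists in dataset:
--         emptylist = []
--         for key, value in categories.items():
--             for i in lists:
--                 if i == value:
--                     emptylist.append(key)
--         dataset2.append(emptylist)
--
--     return dataset2
-- ===== SOURCE B (Python) =====
-- _THEMES = [
--     'Tires & Wheels',
--     'Batteries, Maintenance & Accessories',
--     'Auto Parts',
--     'Oils, Fluids, Additives & Chemicals',
--     'ATVs, Snowmobiles, Motorcycles Parts & Accessories',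
--     'Auto Body Repair, Paints & Accessories',
--     'Exterior Accessories',
--     'Interior Accessories',
--     'Auto Tools',
--     'Car Cleaning',
--     'Garage Organization & Tool Storage',
--     'Power Tools',
--     'Hand Tools',
--     'Air Tools & Compressors',
--     'Paints & Stains',
--     'Ladders & Scaffolding',
--     'Sinks, Faucets & Fixtures',
--     'Plumbing',
--     'Power Tool Accessories',
--     'Electrical',
--     'Appliances',
--     'Kitchen & Dining',
--     'Household & Cleaning Supplies',
--     'Pet Care',
--     'Furniture & Décor',
--     'Heating, Cooling & Air Quality',
--     'Storage & Organization',
--     'Home Electronics',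
--     'Lighting',
--     'Baby & Toddler',
--     'Games Room',
--     'Team Sports',
--     'Winter Sports',
--     'Clothing, Shoes & Accessories',
--     'Fitness & Exercise',
--     'Bikes & Accessories',
--     'Toys & Games',
--     'Hunting',
--     'Fishing',
--     'Camping & Hiking',
--     'Patio Furniture & Décor',
--     'BBQs, Smokers & Accessories',
--     'Outdoor Power Equipment',
--     'Gazebos, Pergolas & Canopies',
--     'Pools, Spas & Accessories',
--     'Outdoor Lighting',
--     'Lawn & Garden',
--     'Outdoor Heating',
--     'Mosquito, Insect & Pest Control',
--     'Sheds & Outdoor Storage',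
--     'Balloons & Accessories',
--     'Party Decorations',
--     'Tableware & Serveware',
--     'Party Favours',
--     'Party Games',
--     'Halloween',
--     'Wrapping Paper, Bags & Acc',
--     'Cards & Invitations',
--     'Party Cleanup',
--     'Snow Removal Equipment',
--     'Winter Sports',
--     'Snowmobile',
--     'Heating, Cooling, & Air Quality',
--     'Winter Tires',
--     'Snow Plows & Accessories',
--     'Winter Apparel',
-- ]
--
-- def create_dictionary_transformed_dataset(dataset):
--     categories = {t: i for i, t in enumerate(_THEMES)}
--     out = []
--     for lst in dataset:
--         cnt = {}
--         for i in lst: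
--             cnt[i] = cnt.get(i, 0) + 1
--         row = []
--         for key, value in categories.items():
--             row += [key] * cnt.get(value, 0)
--         out.append(row)
--     return out
-- ===== Notes on version B (the rewrite author's own statement) =====
-- stated objective: faster
-- what changed: B builds the theme->index dict directly from enumerate(themes) (instead of A's remove-from-a-mutable-range dance) and, per row, builds a count dict of the list once and emits each category key count-many times, removing A's inner scan of the whole list for every one of the 65 categories.
import Mathlib
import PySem

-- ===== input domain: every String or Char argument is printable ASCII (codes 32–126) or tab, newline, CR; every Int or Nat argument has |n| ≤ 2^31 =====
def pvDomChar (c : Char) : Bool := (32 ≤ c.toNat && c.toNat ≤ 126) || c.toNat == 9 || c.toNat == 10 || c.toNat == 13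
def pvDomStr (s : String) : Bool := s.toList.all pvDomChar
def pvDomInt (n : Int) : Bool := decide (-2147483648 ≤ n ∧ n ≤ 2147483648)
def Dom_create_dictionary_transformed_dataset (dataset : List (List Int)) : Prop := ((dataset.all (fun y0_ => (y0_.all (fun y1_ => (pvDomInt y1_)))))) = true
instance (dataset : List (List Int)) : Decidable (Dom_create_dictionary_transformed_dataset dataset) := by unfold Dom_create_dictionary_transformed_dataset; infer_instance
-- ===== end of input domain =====

-- B replaces A's triple nested scan (categories × dict-build gymnastics × list) by a dict comprehension
-- over enumerate(themes) plus a per-row counter dict, appending each key count-many times: asymptotically faster.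
-- ===== PORT A =====
def pvThemes : List String :=
  ["Tires & Wheels",
   "Batteries, Maintenance & Accessories",
   "Auto Parts",
   "Oils, Fluids, Additives & Chemicals",
   "ATVs, Snowmobiles, Motorcycles Parts & Accessories",
   "Auto Body Repair, Paints & Accessories",
   "Exterior Accessories",
   "Interior Accessories",
   "Auto Tools",
   "Car Cleaning",
   "Garage Organization & Tool Storage",
   "Power Tools",
   "Hand Tools",
   "Air Tools & Compressors",
   "Paints & Stains",
   "Ladders & Scaffolding",
   "Sinks, Faucets & Fixtures",
   "Plumbing",
   "Power Tool Accessories",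
   "Electrical",
   "Appliances",
   "Kitchen & Dining",
   "Household & Cleaning Supplies",
   "Pet Care",
   "Furniture & Décor",
   "Heating, Cooling & Air Quality",
   "Storage & Organization",
   "Home Electronics",
   "Lighting",
   "Baby & Toddler",
   "Games Room",
   "Team Sports",
   "Winter Sports",
   "Clothing, Shoes & Accessories",
   "Fitness & Exercise",
   "Bikes & Accessories",
   "Toys & Games",
   "Hunting",
   "Fishing",
   "Camping & Hiking",
   "Patio Furniture & Décor",
   "BBQs, Smokers & Accessories",
   "Outdoor Power Equipment",
   "Gazebos, Pergolas & Canopies",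
   "Pools, Spas & Accessories",
   "Outdoor Lighting",
   "Lawn & Garden",
   "Outdoor Heating",
   "Mosquito, Insect & Pest Control",
   "Sheds & Outdoor Storage",
   "Balloons & Accessories",
   "Party Decorations",
   "Tableware & Serveware",
   "Party Favours",
   "Party Games",
   "Halloween",
   "Wrapping Paper, Bags & Acc",
   "Cards & Invitations",
   "Party Cleanup",
   "Snow Removal Equipment",
   "Winter Sports",
   "Snowmobile",
   "Heating, Cooling, & Air Quality",
   "Winter Tires",
   "Snow Plows & Accessories",
   "Winter Apparel"]

-- 'for value in nums: res[key] = value; nums.remove(value); break' — runs at most the first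
-- iteration: if nums is nonempty it inserts the head and removes it (PySem.List.remove? is exact),
-- otherwise the body never runs.
def combine_categories_with_indices : PySem.Dict String Int :=
  let nums : List Int := (PySem.List.pyRange 0 66 1).foldl (fun acc i => acc ++ [i]) []
  let st := pvThemes.foldl
    (fun (st : PySem.Dict String Int × List Int) key =>
      match st.2 with
      | [] => st
      | v :: _ => (st.1.insert key v, (PySem.List.remove? st.2 v).getD st.2))
    (PySem.Dict.empty, nums)
  st.1

def create_dictionary_transformed_dataset (dataset : List (List Int)) : List (List String) :=
  let categories := combine_categories_with_indices
  dataset.foldl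
    (fun dataset2 lists =>
      dataset2 ++ [categories.items.foldl
        (fun emptylist kv =>
          lists.foldl (fun emptylist i => if i == kv.2 then emptylist ++ [kv.1] else emptylist)
            emptylist)
        []])
    []

-- ===== PORT B =====
def categories_alt : PySem.Dict String Int :=
  (PySem.List.enumerate pvThemes).foldl (fun d p => d.insert p.2 p.1) PySem.Dict.empty

def create_dictionary_transformed_dataset_alt (dataset : List (List Int)) : List (List String) :=
  let categories := categories_alt
  dataset.foldl
    (fun out lst =>
      let cnt : PySem.Dict Int Int := lst.foldl (fun d i => d.insert i (d.getD i 0 + 1)) PySem.Dict.empty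
      let row := categories.items.foldl
        (fun row kv => row ++ PySem.List.pyRepeat [kv.1] (cnt.getD kv.2 0)) []
      out ++ [row])
    []

-- ===== PRECONDITION & SPEC =====
def Spec_create_dictionary_transformed_dataset (dataset : List (List Int)) (out : List (List String)) : Prop := out = create_dictionary_transformed_dataset_alt dataset
instance (dataset : List (List Int)) (out : List (List String)) : Decidable (Spec_create_dictionary_transformed_dataset dataset out) := by unfold Spec_create_dictionary_transformed_dataset; infer_instance

-- ===== CLAIM (what is proved, stated in full; the proofs are below) =====
def Claim_equal_create_dictionary_transformed_dataset : Prop := ∀ (dataset : List (List Int)), Dom_create_dictionary_transformed_dataset dataset → Spec_create_dictionary_transformed_dataset dataset (create_dictionary_transformed_dataset dataset)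

-- ===== LEMMAS AND PROOFS =====
set_option maxRecDepth 20000 in
theorem cats_eq : combine_categories_with_indices = categories_alt := by decide

theorem filter_map_const (l : List Int) (v : Int) (k : String) :
    (l.filter (fun i => i == v)).map (fun _ => k) = List.replicate (l.count v) k := by
  rw [List.filter_beq, List.map_replicate]

theorem row_eq (items : List (String × Int)) (l : List Int) :
    items.foldl
      (fun el kv => l.foldl (fun el i => if i == kv.2 then el ++ [kv.1] else el) el) [] =
    items.foldl
      (fun row kv =>
        row ++ PySem.List.pyRepeat [kv.1]
          ((l.foldl (fun d i => d.insert i (d.getD i 0 + 1)) PySem.Dict.empty).getD kv.2 0)) [] := by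
  have hA : ∀ (acc : List String) kv, (fun (el : List String) (kv : String × Int) => l.foldl (fun el i => if i == kv.2 then el ++ [kv.1] else el) el) acc kv
      = acc ++ (l.filter (fun i => i == kv.2)).map (fun _ => kv.1) := by
    intro acc kv
    exact PySem.List.foldl_append_if (fun i => i == kv.2) (fun _ => kv.1) l acc
  calc items.foldl (fun el kv => l.foldl (fun el i => if i == kv.2 then el ++ [kv.1] else el) el) []
      = items.foldl (fun acc kv => acc ++ (l.filter (fun i => i == kv.2)).map (fun _ => kv.1)) [] := by
        apply PySem.List.foldl_congr_mem; intro acc kv _; exact hA acc kv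
    _ = _ := by
        apply PySem.List.foldl_congr_mem
        intro acc kv _
        rw [PySem.Dict.getD_foldl_insert_add_one, PySem.List.pyRepeat_singleton,
            filter_map_const]
        simp

-- ===== VERDICT (by name: the statement is the Claim_ definition above) =====
theorem create_dictionary_transformed_dataset_spec : Claim_equal_create_dictionary_transformed_dataset := by
  intro dataset _
  unfold Spec_create_dictionary_transformed_dataset create_dictionary_transformed_dataset
    create_dictionary_transformed_dataset_alt
  rw [cats_eq]
  dsimp only
  apply PySem.List.foldl_congr_mem
  intro acc l _
  simp only [row_eq]
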